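-- pv_equiv track=rewrite | github.com/b3z/aoc | 2015/5/niceString.py | isNaughty
-- ===== SOURCE A (Python) =====
-- vowels = list("aeiou") # at least 3
--
-- forbidden = ["ab", "cd", "pq", "xy"] # none
--
-- def isNaughty(s):
--     if any(f in s for f in forbidden):
--         return True
--
--     numVowels = 0
--     letterTwice = False
--     letterTmp = ''
--
--     for c in s:
--         if c in vowels:
--             numVowels += 1
--
--         if c == letterTmp:
--             letterTwice = True
--         else:
--             letterTmp = c
--
--     if numVowels >= 3 and letterTwice:
--         return False
--
--     return True
-- ===== SOURCE B (Python) =====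
-- vowels = list("aeiou") # at least 3
--
-- forbidden = ["ab", "cd", "pq", "xy"] # none
--
-- def isNaughty(s):
--     if any(f in s for f in forbidden):
--         return True
--     counts = {}
--     for c in s:
--         counts[c] = counts.get(c, 0) + 1
--     numVowels = sum(counts.get(v, 0) for v in vowels)
--     hasDouble = any(c + c in s for c in counts)
--     return not (numVowels >= 3 and hasDouble)
-- ===== Notes on version B (the rewrite author's own statement) =====
-- stated objective: alternative
-- what changed: Replaces A's single stateful scan (previous-letter accumulator plus running vowel counter) by building a character-frequency dictionary once, reading the vowel total off it at the five vowels, and detecting a doubled letter by substring search for c+c over the distinct characters.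
import Mathlib
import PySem

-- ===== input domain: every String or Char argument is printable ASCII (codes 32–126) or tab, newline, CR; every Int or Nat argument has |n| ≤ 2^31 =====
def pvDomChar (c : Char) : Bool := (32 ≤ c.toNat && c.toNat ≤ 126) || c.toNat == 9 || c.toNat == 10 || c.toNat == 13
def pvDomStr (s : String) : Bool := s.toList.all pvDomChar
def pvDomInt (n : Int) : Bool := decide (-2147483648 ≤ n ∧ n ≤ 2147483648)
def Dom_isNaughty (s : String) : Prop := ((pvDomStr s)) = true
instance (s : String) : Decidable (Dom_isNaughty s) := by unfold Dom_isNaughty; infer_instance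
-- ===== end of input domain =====

-- B replaces A's single stateful scan (previous-letter accumulator + vowel counter) by a
-- character histogram read at the five vowels plus a doubled-substring search over the
-- distinct characters (objective: alternative decomposition, same O(n) cost).

-- ===== PORT A =====
-- the module constants
def pvVowels : List Char := "aeiou".toList
def pvForbidden : List String := ["ab", "cd", "pq", "xy"]

-- Python's letterTmp starts as the string '' and then holds a one-char string;
-- it is ported as a List Char ([] for '', [c] for the char c).
def pvStepA (acc : Int × Bool × List Char) (c : Char) : Int × Bool × List Char :=
  let numVowels := if c ∈ pvVowels then acc.1 + 1 else acc.1
  if [c] == acc.2.2 then (numVowels, true, acc.2.2) else (numVowels, acc.2.1, [c])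

def isNaughty (s : String) : Bool :=
  if pvForbidden.any (fun f => PySem.Str.isIn f s) then true
  else
    let st := s.toList.foldl pvStepA (0, false, [])
    if st.1 ≥ 3 ∧ st.2.1 then false else true

-- ===== PORT B =====
def isNaughty_alt (s : String) : Bool :=
  if pvForbidden.any (fun f => PySem.Str.isIn f s) then true
  else
    let counts := s.toList.foldl
      (fun d c => d.insert c (d.getD c 0 + 1)) (PySem.Dict.empty : PySem.Dict Char Int)
    let numVowels : Int := (pvVowels.map (fun v => counts.getD v 0)).sum
    let hasDouble := counts.keys.any (fun c => PySem.Str.isIn (String.ofList [c, c]) s)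
    !(decide (numVowels ≥ 3) && hasDouble)

-- ===== PRECONDITION & SPEC =====
def Spec_isNaughty (s : String) (out : Bool) : Prop := out = isNaughty_alt s
instance (s : String) (out : Bool) : Decidable (Spec_isNaughty s out) := by unfold Spec_isNaughty; infer_instance

-- ===== CLAIM (what is proved, stated in full; the proofs are below) =====
def Claim_equal_isNaughty : Prop := ∀ (s : String), Dom_isNaughty s → Spec_isNaughty s (isNaughty s)

-- ===== LEMMAS AND PROOFS =====
def pvPairsAny (l : List Char) : Bool :=
  match l with
  | a :: b :: t => (a == b) || pvPairsAny (b :: t)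
  | _ => false

theorem pvStepA_single (n : Int) (tw : Bool) (p c : Char) :
    pvStepA (n, tw, [p]) c =
      ((if c ∈ pvVowels then n + 1 else n), tw || (c == p), [c]) := by
  by_cases h : c = p
  · subst h; simp [pvStepA]
  · simp [pvStepA, h]

-- A's fold computes the vowel count and 'some adjacent equal pair' once started with one char
theorem pvFoldA (l : List Char) (p : Char) (n : Int) (tw : Bool) :
    l.foldl pvStepA (n, tw, [p]) =
      (n + (l.countP (fun c => decide (c ∈ pvVowels)) : Int),
       tw || pvPairsAny (p :: l),
       [l.getLastD p]) := by
  induction l generalizing p n tw with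
  | nil => simp [pvPairsAny]
  | cons c l ih =>
    rw [List.foldl_cons, pvStepA_single, ih]
    simp only [pvPairsAny, Prod.mk.injEq]
    refine ⟨?_, ?_, ?_⟩
    · rw [List.countP_cons]
      by_cases h : c ∈ pvVowels
      · simp [h]; omega
      · simp [h]
    · have : (c == p) = (p == c) := by
        by_cases h : c = p
        · subst h; rfl
        · simp [h, Ne.symm h]
      rw [this, Bool.or_assoc]
    · cases l with
      | nil => simp
      | cons h t => simp [List.getLastD]

-- summing 'is this vowel' indicators over the five (distinct) vowels
theorem pvSumIndicator (c : Char) :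
    (pvVowels.map (fun v => if v == c then (1 : Int) else 0)).sum
      = if c ∈ pvVowels then 1 else 0 := by
  by_cases hm : c ∈ pvVowels
  · have hm' : c ∈ ['a', 'e', 'i', 'o', 'u'] := hm
    fin_cases hm' <;> decide
  · rw [if_neg hm]
    have h0 : ∀ v ∈ pvVowels, (if v == c then (1 : Int) else 0) = 0 := by
      intro v hv
      by_cases h : v = c
      · exact absurd (h ▸ hv) hm
      · simp [h]
    rw [List.map_congr_left h0]
    simp

-- summing per-vowel character counts equals counting vowel positions
theorem pvSumCount (l : List Char) :
    (pvVowels.map (fun v => (l.count v : Int))).sum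
      = (l.countP (fun c => decide (c ∈ pvVowels)) : Int) := by
  induction l with
  | nil => simp
  | cons c l ih =>
    have hmap : pvVowels.map (fun v => ((c :: l).count v : Int))
        = pvVowels.map (fun v => (l.count v : Int) + (if v == c then (1 : Int) else 0)) := by
      apply List.map_congr_left
      intro v _
      rw [List.count_cons]
      by_cases h : v = c
      · simp [h]
      · simp [h, Ne.symm h]
    rw [hmap, List.sum_map_add, ih, pvSumIndicator, List.countP_cons]
    by_cases h : c ∈ pvVowels
    · simp [h]
    · simp [h]

-- a doubled-letter substring exists iff some adjacent pair is equal
theorem pvDoubleInfix (l : List Char) :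
    (∃ c, c ∈ l ∧ [c, c] <:+: l) ↔ pvPairsAny l = true := by
  induction l with
  | nil =>
    simp [pvPairsAny]
  | cons a t ih =>
    cases t with
    | nil =>
      simp only [pvPairsAny]
      constructor
      · rintro ⟨c, _, h⟩
        have := h.length_le; simp at this
      · intro h; simp at h
    | cons b t' =>
      simp only [pvPairsAny, Bool.or_eq_true, beq_iff_eq]
      constructor
      · rintro ⟨c, hc, hinf⟩
        rcases List.infix_cons_iff.mp hinf with hpre | htail
        · rcases List.cons_prefix_cons.mp hpre with ⟨rfl, hpre2⟩
          rcases List.cons_prefix_cons.mp hpre2 with ⟨rfl, _⟩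
          left; rfl
        · right
          exact ih.mp ⟨c, (htail.subset (by simp)), htail⟩
      · rintro (rfl | h)
        · exact ⟨a, by simp, ⟨[], t', by simp⟩⟩
        · rcases ih.mpr h with ⟨c, hc, hinf⟩
          exact ⟨c, by simp [hc], hinf.trans (List.infix_cons_iff.mpr (Or.inr (List.infix_refl _)))⟩

-- B's histogram pieces
theorem pvCountsGetD (l : List Char) (v : Char) :
    (l.foldl (fun d c => d.insert c (d.getD c 0 + 1))
        (PySem.Dict.empty : PySem.Dict Char Int)).getD v 0 = (l.count v : Int) := by
  rw [PySem.Dict.getD_foldl_insert_add_one]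
  simp [PySem.Dict.empty, PySem.Dict.getD, PySem.Dict.get?]

theorem pvCountsKeys (l : List Char) :
    (l.foldl (fun d c => d.insert c (d.getD c 0 + 1))
        (PySem.Dict.empty : PySem.Dict Char Int)).keys = PySem.Set.ofList l := by
  rw [PySem.Dict.keys_foldl_insert]
  simp [PySem.Dict.empty, PySem.Dict.keys, PySem.Set.update]
  rfl

theorem pvHasDouble (s : String) :
    ((PySem.Set.ofList s.toList).any
        (fun c => PySem.Str.isIn (String.ofList [c, c]) s)) = pvPairsAny s.toList := by
  rw [Bool.eq_iff_iff, List.any_eq_true]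
  rw [← pvDoubleInfix]
  constructor
  · rintro ⟨c, hc, hin⟩
    refine ⟨c, ?_, ?_⟩
    · exact (PySem.Set.mem_ofList _ _).mp hc
    · simpa using (PySem.Str.isIn_iff_infix _ _).mp hin
  · rintro ⟨c, hc, hinf⟩
    exact ⟨c, (PySem.Set.mem_ofList _ _).mpr hc, (PySem.Str.isIn_iff_infix _ _).mpr (by simpa using hinf)⟩

-- ===== VERDICT =====
theorem isNaughty_spec : Claim_equal_isNaughty := by
  intro s _
  unfold Spec_isNaughty isNaughty isNaughty_alt
  by_cases hf : pvForbidden.any (fun f => PySem.Str.isIn f s) = true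
  · rw [if_pos hf, if_pos hf]
  · simp only [hf, if_false, Bool.false_eq_true]
    have hnum : (pvVowels.map (fun v =>
        (s.toList.foldl (fun d c => d.insert c (d.getD c 0 + 1))
          (PySem.Dict.empty : PySem.Dict Char Int)).getD v 0)).sum
        = (s.toList.countP (fun c => decide (c ∈ pvVowels)) : Int) := by
      simp only [pvCountsGetD]; exact pvSumCount _
    have hdbl : ((s.toList.foldl (fun d c => d.insert c (d.getD c 0 + 1))
          (PySem.Dict.empty : PySem.Dict Char Int)).keys.any
          (fun c => PySem.Str.isIn (String.ofList [c, c]) s)) = pvPairsAny s.toList := by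
      rw [pvCountsKeys]; exact pvHasDouble s
    simp only [hnum, hdbl]
    cases hl : s.toList with
    | nil => simp [pvPairsAny]
    | cons c l =>
      have hstep : pvStepA (0, false, ([] : List Char)) c =
          ((if c ∈ pvVowels then (0:Int) + 1 else 0), false, [c]) := by
        simp [pvStepA]
      rw [List.foldl_cons, hstep, pvFoldA]
      rw [List.countP_cons]
      by_cases hv : c ∈ pvVowels <;>
        by_cases hdd : pvPairsAny (c :: l) = true <;>
        simp [hv, hdd] <;> omega
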